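-- pv_equiv track=rewrite | github.com/dertilo/coding | redbaron_type_hinting/adding_type_hints.py | build_annotation_add_to_imports
-- ===== SOURCE A (Python) =====
-- from typing import Tuple, Union, Dict, List, Set, Optional
--
-- typing_list = ["List", "Dict", "Tuple", "Generator", "Any"]
--
-- replace_map = {"NoneType": "None"}
--
-- def build_annotation_add_to_imports(qualname: str) -> Tuple[str, set]:
--     imports = set()
--
--     def append_node(nodes, node_name, children: str = None):
--         if len(node_name) > 0:
--             module_path, ann_name = build_path_name(node_name)
--             if module_path is not None:
--                 imports.add(f"from {module_path} import {ann_name}")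
--             elif ann_name.capitalize() in typing_list:
--                 ann_name = ann_name.capitalize()
--                 imports.add(f"from typing import {ann_name}")
--
--             ann_name = replace_map.get(ann_name, ann_name)
--
--             if children is not None:
--                 ann_name = f"{ann_name}[{children}]"
--
--             nodes.append(ann_name)
--
--     def parse_tree(seq: List[str]) -> str:
--         nodes: List[Union[Dict, str]] = []
--         node = ""
--
--         while len(seq) > 0:
--             x = seq.pop(0)
--             if x == "[":
--                 append_node(nodes, node, children=parse_tree(seq))
--                 node = ""
--             elif x == "]":
--                 append_node(nodes, node)
--                 return ",".join(nodes)
--             elif x == ",":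
--                 append_node(nodes, node)
--                 node = ""
--             else:
--                 node += x
--
--         append_node(nodes, node)
--         return ",".join(nodes)
--
--     ann_name = parse_tree(list(qualname))
--     return ann_name, imports
--
-- def build_path_name(type_name: str) -> Tuple[str, str]:
--     if "." in type_name:
--         s = type_name.split(".")
--         module_path = ".".join(s[:-1])
--         type_name = s[-1]
--     else:
--         module_path = None
--     return module_path, type_name
-- ===== SOURCE B (Python) =====
-- from typing import Tuple, Union, Dict, List, Set, Optional
--
-- typing_list = ["List", "Dict", "Tuple", "Generator", "Any"]
--
-- replace_map = {"NoneType": "None"}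
--
-- def build_annotation_add_to_imports(qualname: str) -> Tuple[str, set]:
--     # iterative single pass with an explicit stack of frames instead of recursion
--     imports = set()
--
--     def append_node(nodes, node_name, children: str = None):
--         if len(node_name) > 0:
--             module_path, ann_name = build_path_name(node_name)
--             if module_path is not None:
--                 imports.add(f"from {module_path} import {ann_name}")
--             elif ann_name.capitalize() in typing_list:
--                 ann_name = ann_name.capitalize()
--                 imports.add(f"from typing import {ann_name}")
--
--             ann_name = replace_map.get(ann_name, ann_name)
--
--             if children is not None:
--                 ann_name = f"{ann_name}[{children}]"
--
--             nodes.append(ann_name)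
--
--     stack = []          # frames: (parent_nodes, node_name before the '[')
--     nodes = []
--     node = ""
--     for x in qualname:
--         if x == "[":
--             stack.append((nodes, node))
--             nodes, node = [], ""
--         elif x == "]":
--             append_node(nodes, node)
--             node = ""
--             if not stack:
--                 return ",".join(nodes), imports   # top-level ']' ends the parse
--             children = ",".join(nodes)
--             nodes, pname = stack.pop()
--             append_node(nodes, pname, children=children)
--         elif x == ",":
--             append_node(nodes, node)
--             node = ""
--         else:
--             node += x
--     append_node(nodes, node)
--     while stack:        # unterminated '[': fold each partial level into its parent
--         children = ",".join(nodes)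
--         nodes, pname = stack.pop()
--         append_node(nodes, pname, children=children)
--     return ",".join(nodes), imports
--
-- def build_path_name(type_name: str) -> Tuple[str, str]:
--     if "." in type_name:
--         s = type_name.split(".")
--         module_path = ".".join(s[:-1])
--         type_name = s[-1]
--     else:
--         module_path = None
--     return module_path, type_name
-- ===== Notes on version B (the rewrite author's own statement) =====
-- stated objective: faster
-- what changed: parse_tree's recursive descent over a shared mutable list (seq.pop(0) each step, O(n) per pop) is replaced by a single O(n) iterative pass over the characters with an explicit stack of (parent_nodes, node_name) frames, reproducing the same edge behaviour on unbalanced brackets (top-level ']' stops, unterminated '[' unwinds partial levels into their parents).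
import Mathlib
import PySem

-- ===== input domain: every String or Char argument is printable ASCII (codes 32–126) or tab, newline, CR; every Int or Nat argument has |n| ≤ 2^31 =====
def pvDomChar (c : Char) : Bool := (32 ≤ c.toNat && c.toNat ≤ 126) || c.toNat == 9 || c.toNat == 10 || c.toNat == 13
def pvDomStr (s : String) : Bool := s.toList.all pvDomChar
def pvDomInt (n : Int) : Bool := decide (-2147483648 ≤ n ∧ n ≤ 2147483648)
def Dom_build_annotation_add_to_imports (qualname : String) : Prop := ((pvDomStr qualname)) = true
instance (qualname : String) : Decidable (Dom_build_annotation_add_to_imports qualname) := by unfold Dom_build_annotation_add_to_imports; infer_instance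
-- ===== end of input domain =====

-- B replaces A's recursive-descent parse_tree (which consumes a shared mutable list) by a
-- single O(n) iterative pass with an explicit stack of frames (objective: faster; A pops from the front of a list each step).

-- shared module constants / helpers (identical in both Python sources)
def pvTypingList : List (List Char) := ["List".toList, "Dict".toList, "Tuple".toList, "Generator".toList, "Any".toList]

-- Python str.capitalize (exact on ASCII): first char uppercased, rest lowercased
def pvCapitalize (s : List Char) : List Char :=
  match s with
  | [] => []
  | c :: rest => PySem.Chars.upperChar c :: PySem.Chars.lower rest

def build_path_name (type_name : List Char) : Option (List Char) × List Char :=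
  if PySem.Chars.isIn ['.'] type_name then
    let s := PySem.Chars.splitOn type_name ['.']
    (some (PySem.Chars.join ['.'] s.dropLast), s.getLastD [])
  else
    (none, type_name)

-- append_node: returns the updated (imports, nodes); imports is a PySem.Set String
def append_node (imp : List String) (nodes : List (List Char)) (node_name : List Char)
    (children : Option (List Char)) : List String × List (List Char) :=
  if node_name.length > 0 then
    let r := build_path_name node_name
    let step : List String × List Char :=
      match r.1 with
      | some mp => (PySem.Set.add imp (String.ofList ("from ".toList ++ mp ++ " import ".toList ++ r.2)), r.2)
      | none =>
          if pvCapitalize r.2 ∈ pvTypingList then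
            (PySem.Set.add imp (String.ofList ("from typing import ".toList ++ pvCapitalize r.2)), pvCapitalize r.2)
          else (imp, r.2)
    let an1 := if step.2 = "NoneType".toList then "None".toList else step.2
    let an2 := match children with
      | some ch => an1 ++ '[' :: ch ++ [']']
      | none => an1
    (step.1, nodes ++ [an2])
  else (imp, nodes)

-- ===== PORT A =====
-- A's recursive parse_tree on a shared consumed list; fuel = length of the remaining input
-- (fuel only makes the recursion structural: with fuel ≥ seq.length the 0-case is never reached).
-- Returns (joined string, remaining input, imports).
def parseTreeA : Nat → List Char → List String → List (List Char) → List Char →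
    List Char × List Char × List String
  | 0, seq, imp, nodes, node =>
      let r := append_node imp nodes node none
      (PySem.Chars.join [','] r.2, seq, r.1)
  | _ + 1, [], imp, nodes, node =>
      let r := append_node imp nodes node none
      (PySem.Chars.join [','] r.2, [], r.1)
  | f + 1, x :: s, imp, nodes, node =>
      if x = '[' then
        let c := parseTreeA f s imp [] []
        let r := append_node c.2.2 nodes node (some c.1)
        parseTreeA f c.2.1 r.1 r.2 []
      else if x = ']' then
        let r := append_node imp nodes node none
        (PySem.Chars.join [','] r.2, s, r.1)
      else if x = ',' then
        let r := append_node imp nodes node none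
        parseTreeA f s r.1 r.2 []
      else
        parseTreeA f s imp nodes (node ++ [x])

def build_annotation_add_to_imports (qualname : String) : String × List String :=
  let cs := qualname.toList
  let r := parseTreeA cs.length cs [] [] []
  (String.ofList r.1, r.2.2)

-- ===== PORT B =====
-- end-of-input unwinding: fold each partial level into its parent frame
def unwindB : List (List (List Char) × List Char) → List String → List (List Char) →
    List Char × List String
  | [], imp, nodes => (PySem.Chars.join [','] nodes, imp)
  | (pn, pname) :: st, imp, nodes =>
      let r := append_node imp pn pname (some (PySem.Chars.join [','] nodes))
      unwindB st r.1 r.2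

-- the single iterative pass; stack frames hold (parent nodes, node name before the '[')
def loopB : List Char → List String → List (List (List Char) × List Char) →
    List (List Char) → List Char → List Char × List String
  | [], imp, stack, nodes, node =>
      let r := append_node imp nodes node none
      unwindB stack r.1 r.2
  | x :: s, imp, stack, nodes, node =>
      if x = '[' then
        loopB s imp ((nodes, node) :: stack) [] []
      else if x = ']' then
        let r := append_node imp nodes node none
        match stack with
        | [] => (PySem.Chars.join [','] r.2, r.1)
        | (pn, pname) :: st =>
            let r2 := append_node r.1 pn pname (some (PySem.Chars.join [','] r.2))
            loopB s r2.1 st r2.2 []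
      else if x = ',' then
        let r := append_node imp nodes node none
        loopB s r.1 stack r.2 []
      else
        loopB s imp stack nodes (node ++ [x])

def build_annotation_add_to_imports_alt (qualname : String) : String × List String :=
  let r := loopB qualname.toList [] [] [] []
  (String.ofList r.1, r.2)

-- ===== PRECONDITION & SPEC =====
def Spec_build_annotation_add_to_imports (qualname : String) (out : String × List String) : Prop := out = build_annotation_add_to_imports_alt qualname
instance (qualname : String) (out : String × List String) : Decidable (Spec_build_annotation_add_to_imports qualname out) := by unfold Spec_build_annotation_add_to_imports; infer_instance

-- ===== CLAIM (what is proved, stated in full; the proofs are below) =====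
def Claim_equal_build_annotation_add_to_imports : Prop := ∀ (qualname : String), Dom_build_annotation_add_to_imports qualname → Spec_build_annotation_add_to_imports qualname (build_annotation_add_to_imports qualname)

-- ===== LEMMAS AND PROOFS =====

-- "finish" an A-result against a pending stack of B-frames
def finishB : List Char × List Char × List String → List (List (List Char) × List Char) →
    List Char × List String
  | r, [] => (r.1, r.2.2)
  | r, (pn, pname) :: st =>
      let r2 := append_node r.2.2 pn pname (some r.1)
      loopB r.2.1 r2.1 st r2.2 []

theorem append_node_nil (imp : List String) (nodes : List (List Char)) :
    append_node imp nodes [] none = (imp, nodes) := by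
  simp [append_node]

theorem unwindB_eq_finishB (st : List (List (List Char) × List Char)) (imp : List String)
    (nodes : List (List Char)) :
    unwindB st imp nodes = finishB (PySem.Chars.join [','] nodes, [], imp) st := by
  cases st with
  | nil => rfl
  | cons fr st =>
      obtain ⟨pn, pname⟩ := fr
      simp only [unwindB, finishB, loopB, append_node_nil]

theorem parseTreeA_rest_length (f : Nat) :
    ∀ (seq : List Char) (imp : List String) (nodes : List (List Char)) (node : List Char),
      (parseTreeA f seq imp nodes node).2.1.length ≤ seq.length := by
  induction f with
  | zero => intro seq imp nodes node; simp [parseTreeA]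
  | succ f ih =>
      intro seq imp nodes node
      cases seq with
      | nil => simp [parseTreeA]
      | cons x s =>
          by_cases h1 : x = '['
          · simp only [parseTreeA, if_pos h1, List.length_cons]
            have h2 := ih s imp [] []
            have h3 := ih (parseTreeA f s imp [] []).2.1
              (append_node (parseTreeA f s imp [] []).2.2 nodes node (some (parseTreeA f s imp [] []).1)).1
              (append_node (parseTreeA f s imp [] []).2.2 nodes node (some (parseTreeA f s imp [] []).1)).2 []
            omega
          · by_cases h2 : x = ']'
            · simp only [parseTreeA, if_neg h1, if_pos h2]; simp
            · by_cases h3 : x = ','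
              · simp only [parseTreeA, if_neg h1, if_neg h2, if_pos h3, List.length_cons]
                have := ih s (append_node imp nodes node none).1 (append_node imp nodes node none).2 []
                omega
              · simp only [parseTreeA, if_neg h1, if_neg h2, if_neg h3, List.length_cons]
                have := ih s imp nodes (node ++ [x])
                omega

theorem loopB_eq_finish (f : Nat) :
    ∀ (seq : List Char), seq.length ≤ f →
    ∀ (imp : List String) (stack : List (List (List Char) × List Char))
      (nodes : List (List Char)) (node : List Char),
      loopB seq imp stack nodes node = finishB (parseTreeA f seq imp nodes node) stack := by
  induction f with
  | zero =>
      intro seq hlen imp stack nodes node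
      have : seq = [] := List.eq_nil_of_length_eq_zero (Nat.le_zero.mp hlen)
      subst this
      simp only [loopB, parseTreeA]
      exact unwindB_eq_finishB _ _ _
  | succ f ih =>
      intro seq hlen imp stack nodes node
      cases seq with
      | nil =>
          simp only [loopB, parseTreeA]
          exact unwindB_eq_finishB _ _ _
      | cons x s =>
          have hs : s.length ≤ f := by simp at hlen; omega
          by_cases h1 : x = '['
          · simp only [loopB, parseTreeA, if_pos h1]
            rw [ih s hs imp ((nodes, node) :: stack) [] []]
            simp only [finishB]
            exact ih _ (le_trans (parseTreeA_rest_length f s imp [] []) hs) _ _ _ _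
          · by_cases h2 : x = ']'
            · simp only [loopB, parseTreeA, if_neg h1, if_pos h2]
              cases stack with
              | nil => rfl
              | cons fr st => obtain ⟨pn, pname⟩ := fr; rfl
            · by_cases h3 : x = ','
              · simp only [loopB, parseTreeA, if_neg h1, if_neg h2, if_pos h3]
                exact ih s hs _ stack _ []
              · simp only [loopB, parseTreeA, if_neg h1, if_neg h2, if_neg h3]
                exact ih s hs imp stack nodes (node ++ [x])

-- ===== VERDICT (by name: the statement is the Claim_ definition above) =====
theorem build_annotation_add_to_imports_spec : Claim_equal_build_annotation_add_to_imports := by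
  intro qualname _
  unfold Spec_build_annotation_add_to_imports
  unfold build_annotation_add_to_imports build_annotation_add_to_imports_alt
  rw [loopB_eq_finish qualname.toList.length qualname.toList (le_refl _) [] [] [] []]
  rfl
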